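-- pv_equiv track=rewrite | github.com/imare32/manim_lace | manim_lace/rosette.py | sort_petals
-- ===== SOURCE A (Python) =====
-- import math
--
-- def sort_petals(petals, level):
--     """根据拓扑连接顺序重新排列花瓣"""
--     n = len(petals)
--     step = level + 1
--     num_cycles = math.gcd(n, step)
--     cycle_len = n // num_cycles
--
--     idxs = []
--     for i in range(num_cycles):
--         current = i
--         for _ in range(cycle_len):
--             idxs.append(current)
--             current = (current + step) % n
--
--     return [petals[i] for i in idxs]
-- ===== SOURCE B (Python) =====
-- import math
--
-- def sort_petals(petals, level):
--     """Reorder petals by topological cycle traversal: closed-form single pass.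
--
--     The source index for output position p is derived arithmetically
--     (p // cycle_len picks the cycle, p % cycle_len the step along it)
--     instead of walking each orbit incrementally.
--     """
--     n = len(petals)
--     step = level + 1
--     if n == 0:
--         return []
--     num_cycles = math.gcd(n, step)
--     cycle_len = n // num_cycles
--     return [petals[(p // cycle_len + (p % cycle_len) * step) % n] for p in range(n)]
-- ===== Notes on version B (the rewrite author's own statement) =====
-- stated objective: simpler
-- what changed: Replaces the nested orbit walk (outer loop over cycles, inner loop maintaining current=(current+step)%n and an idxs accumulator) by a single flat comprehension over output positions that computes each source index in closed form as (p//cycle_len + (p%cycle_len)*step) % n.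
-- outside the precondition, e.g. on sort_petals([], -1): A raises ZeroDivisionError, B returns []
import Mathlib
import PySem

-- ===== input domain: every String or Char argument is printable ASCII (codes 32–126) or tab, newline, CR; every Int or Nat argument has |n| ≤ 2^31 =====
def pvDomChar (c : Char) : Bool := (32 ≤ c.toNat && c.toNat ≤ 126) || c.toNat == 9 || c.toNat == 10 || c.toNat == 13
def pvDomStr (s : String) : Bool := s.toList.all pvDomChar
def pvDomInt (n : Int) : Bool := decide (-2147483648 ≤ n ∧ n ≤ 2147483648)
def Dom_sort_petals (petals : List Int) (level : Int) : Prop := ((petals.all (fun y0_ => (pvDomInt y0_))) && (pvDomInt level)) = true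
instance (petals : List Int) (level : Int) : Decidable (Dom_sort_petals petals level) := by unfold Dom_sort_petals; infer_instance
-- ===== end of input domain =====

-- B changes the decomposition: a single flat pass with a closed-form source index
-- instead of A's nested orbit walk; B also returns [] where A divides by zero.

-- ===== PORT A =====
-- literal port of A: nested loops building idxs, inner state is (idxs, current)
def sort_petals (petals : List Int) (level : Int) : List Int :=
  let n : Int := PySem.List.len petals
  let step : Int := level + 1
  let num_cycles : Int := (Int.gcd n step : Int)          -- math.gcd = gcd of absolute values
  let cycle_len : Int := PySem.Int.floordiv n num_cycles
  let idxs : List Int :=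
    (PySem.List.pyRange 0 num_cycles 1).foldl (fun acc i =>
      ((PySem.List.pyRange 0 cycle_len 1).foldl
        (fun (s : List Int × Int) _ => (s.1 ++ [s.2], PySem.Int.mod (s.2 + step) n))
        (acc, i)).1) []
  -- petals[i]: each i in idxs satisfies 0 ≤ i < n under Pre_, so pyGetD is exact here
  idxs.map (fun i => PySem.List.pyGetD petals i 0)

-- ===== PORT B =====
def sort_petals_alt (petals : List Int) (level : Int) : List Int :=
  let n : Int := PySem.List.len petals
  let step : Int := level + 1
  if n = 0 then []
  else
    let num_cycles : Int := (Int.gcd n step : Int)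
    let cycle_len : Int := PySem.Int.floordiv n num_cycles
    (PySem.List.pyRange 0 n 1).map (fun p =>
      PySem.List.pyGetD petals
        (PySem.Int.mod (PySem.Int.floordiv p cycle_len + PySem.Int.mod p cycle_len * step) n) 0)

-- ===== PRECONDITION & SPEC =====
-- Pre_ excludes only ([], -1), where A raises ZeroDivisionError (n // gcd(0,0)).
def Pre_sort_petals (petals : List Int) (level : Int) : Prop :=
  petals ≠ [] ∨ level ≠ -1
instance (petals : List Int) (level : Int) : Decidable (Pre_sort_petals petals level) := by
  unfold Pre_sort_petals; infer_instance
def pvWitness_sort_petals : List Int × Int := ([10, 20, 30, 40, 50, 60], 1)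

def Spec_sort_petals (petals : List Int) (level : Int) (out : List Int) : Prop :=
  out = sort_petals_alt petals level
instance (petals : List Int) (level : Int) (out : List Int) : Decidable (Spec_sort_petals petals level out) := by
  unfold Spec_sort_petals; infer_instance

-- ===== CLAIM (what is proved, stated in full; the proofs are below) =====
def Claim_equal_sort_petals : Prop := ∀ (petals : List Int) (level : Int), Dom_sort_petals petals level → Pre_sort_petals petals level → Spec_sort_petals petals level (sort_petals petals level)

-- ===== LEMMAS AND PROOFS =====

def pvOrbit (step n cur : Int) : Nat → List Int
  | 0 => []
  | k + 1 => cur :: pvOrbit step n (PySem.Int.mod (cur + step) n) k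

theorem pv_inner_fold {β : Type} (step n : Int) (l : List β) (acc : List Int) (cur : Int) :
    (l.foldl (fun (s : List Int × Int) _ => (s.1 ++ [s.2], PySem.Int.mod (s.2 + step) n)) (acc, cur)).1
      = acc ++ pvOrbit step n cur l.length := by
  induction l generalizing acc cur with
  | nil => simp [pvOrbit]
  | cons x xs ih => simp [List.foldl_cons, ih, pvOrbit]

theorem pv_orbit_closed (step n : Int) (hn : 0 < n) (c : Int) (k : Nat) :
    pvOrbit step n (PySem.Int.mod c n) k
      = (List.range k).map (fun (j : Nat) => PySem.Int.mod (c + (j : Int) * step) n) := by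
  induction k generalizing c with
  | zero => simp [pvOrbit]
  | succ m ih =>
    have hstep : PySem.Int.mod (PySem.Int.mod c n + step) n = PySem.Int.mod (c + step) n := by
      simp [PySem.Int.mod_eq_emod_of_pos hn, Int.emod_add_emod]
    rw [List.range_succ_eq_map, List.map_cons]
    simp only [pvOrbit, hstep, ih (c + step), List.map_map]
    refine List.cons_eq_cons.mpr ⟨by simp, ?_⟩
    apply List.map_congr_left
    intro j _
    simp only [Function.comp_apply]
    congr 1
    push_cast
    ring

theorem pv_range_mul (a b : Nat) :
    List.range (a * b) = (List.range a).flatMap (fun i => (List.range b).map (fun j => i * b + j)) := by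
  induction a with
  | zero => simp
  | succ m ih =>
    have h : (m + 1) * b = m * b + b := by ring
    rw [h, List.range_add, List.range_succ, List.flatMap_append, ← ih]
    simp

theorem pv_main : ∀ (petals : List Int) (level : Int), (petals ≠ [] ∨ level ≠ -1) →
    sort_petals petals level = sort_petals_alt petals level := by
  intro petals level hpre
  by_cases hemp : petals = []
  · subst hemp
    have hstep : level + 1 ≠ 0 := by
      rcases hpre with h | h
      · exact absurd rfl h
      · omega
    simp only [sort_petals, sort_petals_alt, PySem.List.len_eq, List.length_nil, Nat.cast_zero]
    have h0 : PySem.Int.floordiv 0 ((Int.gcd 0 (level + 1) : Nat) : Int) = 0 := by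
      have := PySem.Int.floordiv_natCast 0 (Int.gcd 0 (level + 1))
      simpa using this
    rw [h0]
    have hr : PySem.List.pyRange 0 0 1 = [] := by decide
    rw [hr]
    simp [List.foldl]
  · -- main case: petals nonempty
    set N := petals.length with hN
    have hN0 : 0 < N := List.length_pos_iff.mpr hemp
    set step := level + 1 with hstepdef
    set g := Int.gcd (N : Int) step with hg
    have hgN : g ∣ N := by
      have := Int.gcd_dvd_left (a := (N : Int)) (b := step)
      exact_mod_cast this
    have hg0 : 0 < g := by
      rcases Nat.eq_zero_or_pos g with h | h
      · exfalso
        have := Int.gcd_eq_zero_iff.mp (by exact_mod_cast h : Int.gcd (N:Int) step = 0)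
        have : (N : Int) = 0 := this.1
        omega
      · exact h
    set C := N / g with hC
    have hNC : N = g * C := (Nat.div_mul_cancel hgN).symm.trans (Nat.mul_comm C g) |>.symm ▸ by
      rw [hC, Nat.mul_div_cancel' hgN]
    have hC0 : 0 < C := by
      rcases Nat.eq_zero_or_pos C with h | h
      · exfalso; rw [h, Nat.mul_zero] at hNC; omega
      · exact h
    have hn : (0 : Int) < (N : Int) := by exact_mod_cast hN0
    -- A side
    have hlen : PySem.List.len petals = (N : Int) := by simp [PySem.List.len_eq, hN]
    have hcl : PySem.Int.floordiv (N : Int) ((g : Nat) : Int) = (C : Int) := by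
      simp [hC, PySem.Int.floordiv_natCast N g]
    have hinlen : (PySem.List.pyRange 0 ((C : Nat) : Int) 1).length = C := by
      rw [PySem.List.pyRange_zero_natCast]; simp
    have key : ∀ i : Nat, i < g →
        pvOrbit step (N : Int) ((i : Nat) : Int) C
          = (List.range C).map (fun (j : Nat) => PySem.Int.mod ((i : Int) + (j : Int) * step) (N : Int)) := by
      intro i hi
      have hiN : i < N := lt_of_lt_of_le hi (Nat.le_of_dvd hN0 hgN)
      have hmod : PySem.Int.mod ((i : Nat) : Int) (N : Int) = ((i : Nat) : Int) := by
        simp [PySem.Int.mod_natCast i N |>.trans (by rw [Nat.mod_eq_of_lt hiN])]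
      calc pvOrbit step (N : Int) ((i : Nat) : Int) C
          = pvOrbit step (N : Int) (PySem.Int.mod ((i : Nat) : Int) (N : Int)) C := by rw [hmod]
        _ = _ := pv_orbit_closed step (N : Int) hn (i : Int) C
    have hA : sort_petals petals level
        = ((List.range g).flatMap (fun (i : Nat) =>
            (List.range C).map (fun (j : Nat) => PySem.Int.mod ((i : Int) + (j : Int) * step) (N : Int)))).map
          (fun idx => PySem.List.pyGetD petals idx 0) := by
      simp only [sort_petals, hlen]
      rw [show (Int.gcd (N : Int) (level + 1) : Int) = ((g : Nat) : Int) by rw [hg]]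
      rw [hcl]
      have hbody : ∀ (acc : List Int) (i : Int),
          ((PySem.List.pyRange 0 ((C : Nat) : Int) 1).foldl
            (fun (s : List Int × Int) _ => (s.1 ++ [s.2], PySem.Int.mod (s.2 + step) (N : Int)))
            (acc, i)).1 = acc ++ pvOrbit step (N : Int) i C := by
        intro acc i
        rw [pv_inner_fold, hinlen]
      rw [List.foldl_ext _ (fun acc i => acc ++ pvOrbit step (N : Int) i C) [] (fun acc b _ => hbody acc b)]
      rw [PySem.List.foldl_append_eq_flatMap, List.nil_append]
      rw [PySem.List.pyRange_zero_natCast, List.flatMap_map]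
      rw [List.map_flatMap, List.map_flatMap]
      refine List.flatMap_congr (fun i hi => ?_)
      rw [key i (List.mem_range.mp hi), List.map_map]
    have hB : sort_petals_alt petals level
        = ((List.range g).flatMap (fun (i : Nat) =>
            (List.range C).map (fun (j : Nat) =>
              PySem.List.pyGetD petals (PySem.Int.mod ((i : Int) + (j : Int) * step) (N : Int)) 0))) := by
      simp only [sort_petals_alt, hlen]
      rw [if_neg (by omega : ¬ (N : Int) = 0)]
      rw [show (Int.gcd (N : Int) (level + 1) : Int) = ((g : Nat) : Int) by rw [hg]]
      rw [hcl]
      rw [PySem.List.pyRange_zero_natCast, List.map_map]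
      rw [show List.range N = List.range (g * C) from by rw [← hNC]]
      rw [pv_range_mul g C, List.map_flatMap]
      refine List.flatMap_congr (fun i hi => ?_)
      rw [List.map_map]
      apply List.map_congr_left
      intro j hj
      have hj' : j < C := List.mem_range.mp hj
      have hdiv : (i * C + j) / C = i := by
        rw [Nat.mul_comm i C, Nat.mul_add_div hC0, Nat.div_eq_of_lt hj', Nat.add_zero]
      have hmod2 : (i * C + j) % C = j := by
        rw [Nat.add_comm, Nat.add_mul_mod_self_right, Nat.mod_eq_of_lt hj']
      simp only [Function.comp_apply, PySem.Int.floordiv_natCast, PySem.Int.mod_natCast,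
        hdiv, hmod2]
      rw [hstepdef]
    rw [hA, hB, List.map_flatMap]
    simp only [List.map_map, Function.comp_def]

-- ===== VERDICT (by name: the statement is the Claim_ definition above) =====
theorem sort_petals_spec : Claim_equal_sort_petals := by
  intro petals level _ hpre
  exact pv_main petals level hpre
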